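-- pv_equiv track=rewrite | github.com/Brunapupo/INE560-Introducao_a_Programacao_Orientada_a_Objetos | Lista13/0005.py | verifica_diagonal_acima_valor_zero
-- ===== SOURCE A (Python) =====
-- def verifica_diagonal_acima_valor_zero(m):
--     resultado = []
--     diagonal = 1
--     while diagonal <= len(m) - 1:
--         linha = 0
--         coluna = diagonal
--         lista = []
--         while coluna <= len(m) - 1:
--             elemento = m[linha][coluna]
--             lista.append(elemento)
--             linha += 1
--             coluna += 1
--         diagonal += 1
--         resultado.append(lista)
--     resultado_com_zeros = []
--     for i in resultado:
--         if 0 in i: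
--             resultado_com_zeros.append(i)
--     return resultado_com_zeros
-- ===== SOURCE B (Python) =====
-- def verifica_diagonal_acima_valor_zero(m):
--     n = len(m)
--     buckets = [[] for _ in range(n)]
--     for i, row in enumerate(m):
--         for j in range(i + 1, n):
--             buckets[j - i].append(row[j])
--     return [b for b in buckets[1:] if 0 in b]
-- ===== Notes on version B (the rewrite author's own statement) =====
-- stated objective: alternative
-- what changed: A walks the matrix diagonal by diagonal with nested while loops and manual index bookkeeping, then filters; B makes a single row-major pass distributing each element m[i][j] (j>i) into a bucket indexed by the diagonal offset j-i, then keeps the buckets containing 0. Pre_ only excludes ragged matrices on which both programs raise IndexError.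
import Mathlib
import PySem

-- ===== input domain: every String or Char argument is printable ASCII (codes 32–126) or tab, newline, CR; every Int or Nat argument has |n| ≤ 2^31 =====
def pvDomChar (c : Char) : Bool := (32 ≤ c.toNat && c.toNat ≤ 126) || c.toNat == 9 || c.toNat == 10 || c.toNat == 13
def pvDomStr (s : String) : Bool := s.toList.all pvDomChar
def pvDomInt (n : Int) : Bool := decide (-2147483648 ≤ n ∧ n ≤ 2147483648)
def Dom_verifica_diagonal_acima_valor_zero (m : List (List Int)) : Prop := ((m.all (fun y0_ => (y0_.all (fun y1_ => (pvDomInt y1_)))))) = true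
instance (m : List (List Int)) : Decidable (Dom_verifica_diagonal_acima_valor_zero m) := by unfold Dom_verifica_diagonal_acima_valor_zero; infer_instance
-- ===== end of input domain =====

-- B is an alternative of the same cost: a single row-major pass distributing elements into
-- diagonal-offset buckets instead of A's diagonal-by-diagonal nested while loops.

-- ===== PORT A =====
-- element access m[linha][coluna]; inside Pre_ the indices are always in range,
-- so the defaulted lookup agrees with Python's (which raises only outside Pre_)
def elemA (m : List (List Int)) (i j : Nat) : Int := (m.getD i []).getD j 0

-- inner while loop of A
def innerA (m : List (List Int)) (linha coluna : Nat) (lista : List Int) : List Int :=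
  if (coluna : Int) ≤ (m.length : Int) - 1 then
    innerA m (linha + 1) (coluna + 1) (lista ++ [elemA m linha coluna])
  else lista
termination_by m.length - coluna
decreasing_by omega

-- outer while loop of A
def outerA (m : List (List Int)) (diagonal : Nat) (resultado : List (List Int)) : List (List Int) :=
  if (diagonal : Int) ≤ (m.length : Int) - 1 then
    outerA m (diagonal + 1) (resultado ++ [innerA m 0 diagonal []])
  else resultado
termination_by m.length - diagonal
decreasing_by omega

def verifica_diagonal_acima_valor_zero (m : List (List Int)) : List (List Int) :=
  (outerA m 1 []).foldl (fun acc i => if (0 : Int) ∈ i then acc ++ [i] else acc) []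

-- ===== PORT B =====
-- buckets[j - i].append(row[j]); in-range inside Pre_, like elemA above
def bStep (i0 : Nat) (row : List Int) (bs : List (List Int)) (j : Nat) : List (List Int) :=
  bs.set (j - i0) ((bs.getD (j - i0) []) ++ [row.getD j 0])

-- inner 'for j in range(i+1, n)' of B
def bRow (n : Nat) (bs : List (List Int)) (p : List Int × Nat) : List (List Int) :=
  (List.range' (p.2 + 1) (n - (p.2 + 1))).foldl (bStep p.2 p.1) bs

def verifica_diagonal_acima_valor_zero_alt (m : List (List Int)) : List (List Int) :=
  ((m.zipIdx.foldl (bRow m.length) (List.replicate m.length [])).drop 1).filter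
    (fun b => decide ((0 : Int) ∈ b))

-- ===== PRECONDITION & SPEC =====
-- Pre_ excludes exactly the ragged matrices on which the Python A raises IndexError
-- (some row other than the last is shorter than len(m)); B raises there too.
def Pre_verifica_diagonal_acima_valor_zero (m : List (List Int)) : Prop :=
  ∀ r ∈ m.dropLast, m.length ≤ r.length
instance (m : List (List Int)) : Decidable (Pre_verifica_diagonal_acima_valor_zero m) := by
  unfold Pre_verifica_diagonal_acima_valor_zero; infer_instance

def pvWitness_verifica_diagonal_acima_valor_zero : List (List Int) :=
  [[1, 0, 3], [4, 5, 0], [7, 8, 9]]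

def Spec_verifica_diagonal_acima_valor_zero (m : List (List Int)) (out : List (List Int)) : Prop := out = verifica_diagonal_acima_valor_zero_alt m
instance (m : List (List Int)) (out : List (List Int)) : Decidable (Spec_verifica_diagonal_acima_valor_zero m out) := by unfold Spec_verifica_diagonal_acima_valor_zero; infer_instance

-- ===== CLAIM (what is proved, stated in full; the proofs are below) =====
def Claim_equal_verifica_diagonal_acima_valor_zero : Prop := ∀ (m : List (List Int)), Dom_verifica_diagonal_acima_valor_zero m → Pre_verifica_diagonal_acima_valor_zero m → Spec_verifica_diagonal_acima_valor_zero m (verifica_diagonal_acima_valor_zero m)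

-- ===== LEMMAS AND PROOFS =====

-- closed form for A's inner loop
theorem innerA_eq (m : List (List Int)) :
    ∀ (k linha coluna : Nat) (lista : List Int), k = m.length - coluna →
      innerA m linha coluna lista
        = lista ++ (List.range k).map (fun t => elemA m (linha + t) (coluna + t)) := by
  intro k
  induction k with
  | zero =>
    intro linha coluna lista hk
    rw [innerA]
    have : ¬ ((coluna : Int) ≤ (m.length : Int) - 1) := by omega
    simp [this]
  | succ k ih =>
    intro linha coluna lista hk
    rw [innerA]
    have hlt : (coluna : Int) ≤ (m.length : Int) - 1 := by omega
    rw [if_pos hlt, ih (linha + 1) (coluna + 1) _ (by omega),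
      List.range_succ_eq_map, List.map_cons, List.map_map]
    have hfe : ((fun t => elemA m (linha + t) (coluna + t)) ∘ Nat.succ)
        = fun t => elemA m (linha + 1 + t) (coluna + 1 + t) := by
      funext t
      have h1 : linha + (t + 1) = linha + 1 + t := by omega
      have h2 : coluna + (t + 1) = coluna + 1 + t := by omega
      simp [Function.comp, Nat.succ_eq_add_one, h1, h2]
    rw [hfe]
    simp

-- closed form for A's outer loop
theorem outerA_eq (m : List (List Int)) :
    ∀ (k diagonal : Nat) (resultado : List (List Int)), k = m.length - diagonal →
      outerA m diagonal resultado
        = resultado ++ (List.range k).map (fun t => innerA m 0 (diagonal + t) []) := by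
  intro k
  induction k with
  | zero =>
    intro diagonal resultado hk
    rw [outerA]
    have : ¬ ((diagonal : Int) ≤ (m.length : Int) - 1) := by omega
    simp [this]
  | succ k ih =>
    intro diagonal resultado hk
    rw [outerA]
    have hlt : (diagonal : Int) ≤ (m.length : Int) - 1 := by omega
    rw [if_pos hlt, ih (diagonal + 1) _ (by omega),
      List.range_succ_eq_map, List.map_cons, List.map_map]
    have hfe : ((fun t => innerA m 0 (diagonal + t) []) ∘ Nat.succ)
        = fun t => innerA m 0 (diagonal + 1 + t) [] := by
      funext t
      have h1 : diagonal + (t + 1) = diagonal + 1 + t := by omega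
      simp [Function.comp, Nat.succ_eq_add_one, h1]
    rw [hfe]
    simp

-- contribution of a suffix of rows (starting at absolute index i0) to bucket d
def contribB (n d : Nat) : List (List Int) → Nat → List Int
  | [], _ => []
  | row :: rest, i0 =>
      (if 1 ≤ d ∧ i0 + d < n then [row.getD (i0 + d) 0] else []) ++ contribB n d rest (i0 + 1)

-- effect of B's inner for-loop on every bucket
theorem bStep_fold (i0 : Nat) (row : List Int) :
    ∀ (c a : Nat) (bs : List (List Int)), i0 < a →
      (List.range' a c).foldl (bStep i0 row) bs
        = (List.range bs.length).map (fun d =>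
            bs.getD d [] ++ if a ≤ i0 + d ∧ i0 + d < a + c then [row.getD (i0 + d) 0] else []) := by
  intro c
  induction c with
  | zero =>
    intro a bs ha
    apply List.ext_getElem
    · simp
    · intro i h1 h2
      have hi : i < bs.length := by simpa using h1
      simp [hi]
  | succ c ih =>
    intro a bs ha
    have hr : List.range' a (c + 1) = a :: List.range' (a + 1) c := by
      simp [List.range'_succ]
    rw [hr, List.foldl_cons, ih (a + 1) _ (by omega)]
    have hlen : (bStep i0 row bs a).length = bs.length := by simp [bStep]
    rw [hlen]
    apply List.ext_getElem
    · simp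
    · intro i h1 h2
      have hi : i < bs.length := by simpa using h1
      simp only [List.getElem_map, List.getElem_range]
      by_cases hd : i = a - i0
      · have hia : i0 + i = a := by omega
        have hset : (bStep i0 row bs a).getD i [] = bs.getD i [] ++ [row.getD (i0 + i) 0] := by
          unfold bStep
          rw [List.getD_eq_getElem _ _ (by simpa using hi), List.getElem_set,
            if_pos hd.symm, ← hd, hia, ← hia, List.getD_eq_getElem _ _ hi]
        have h1' : ¬ (a + 1 ≤ i0 + i ∧ i0 + i < a + 1 + c) := by omega
        have h2' : a ≤ i0 + i ∧ i0 + i < a + (c + 1) := by omega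
        rw [hset, if_neg h1', if_pos h2', List.append_nil]
      · have hdi : a - i0 ≠ i := fun h => hd h.symm
        have hset : (bStep i0 row bs a).getD i [] = bs.getD i [] := by
          unfold bStep
          rw [List.getD_eq_getElem _ _ (by simpa using hi), List.getElem_set,
            if_neg hdi, List.getD_eq_getElem _ _ hi]
        have hcond : (a + 1 ≤ i0 + i ∧ i0 + i < a + 1 + c) ↔ (a ≤ i0 + i ∧ i0 + i < a + (c + 1)) := by
          omega
        rw [hset]
        by_cases hc : a ≤ i0 + i ∧ i0 + i < a + (c + 1)
        · rw [if_pos hc, if_pos (hcond.mpr hc)]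
        · rw [if_neg hc, if_neg (fun h => hc (hcond.mp h))]

-- effect of one bRow step
theorem bRow_spec (n : Nat) (row : List Int) (i0 : Nat) (bs : List (List Int)) (hlen : bs.length = n) :
    bRow n bs (row, i0)
      = (List.range n).map (fun d =>
          bs.getD d [] ++ if 1 ≤ d ∧ i0 + d < n then [row.getD (i0 + d) 0] else []) := by
  unfold bRow
  rw [bStep_fold i0 row (n - (i0 + 1)) (i0 + 1) bs (by omega), hlen]
  apply List.map_congr_left
  intro d hd
  have hiff : (i0 + 1 ≤ i0 + d ∧ i0 + d < i0 + 1 + (n - (i0 + 1))) ↔ (1 ≤ d ∧ i0 + d < n) := by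
    omega
  by_cases hc : 1 ≤ d ∧ i0 + d < n
  · rw [if_pos (hiff.mpr hc), if_pos hc]
  · rw [if_neg (fun h => hc (hiff.mp h)), if_neg hc]

-- invariant for B's fold over the rows
theorem fillInv (n : Nat) :
    ∀ (l : List (List Int)) (i0 : Nat) (bs : List (List Int)), bs.length = n →
      (l.zipIdx i0).foldl (bRow n) bs
        = (List.range n).map (fun d => bs.getD d [] ++ contribB n d l i0) := by
  intro l
  induction l with
  | nil =>
    intro i0 bs hlen
    subst hlen
    apply List.ext_getElem
    · simp
    · intro i h1 h2
      have hi : i < bs.length := by simpa using h1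
      simp [contribB, hi]
  | cons row rest ih =>
    intro i0 bs hlen
    rw [List.zipIdx_cons, List.foldl_cons, bRow_spec n row i0 bs hlen,
      ih (i0 + 1) _ (by simp)]
    apply List.map_congr_left
    intro d hd
    have hdn : d < n := by simpa using hd
    have hget : ((List.range n).map (fun d =>
        bs.getD d [] ++ if 1 ≤ d ∧ i0 + d < n then [row.getD (i0 + d) 0] else [])).getD d []
        = bs.getD d [] ++ if 1 ≤ d ∧ i0 + d < n then [row.getD (i0 + d) 0] else [] := by
      rw [List.getD_eq_getElem _ _ (by simpa using hdn)]
      simp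
    rw [hget, contribB, List.append_assoc]

-- the contribution list of bucket d is exactly A's diagonal d
theorem contribB_eq (m : List (List Int)) (d : Nat) (hd : 1 ≤ d) :
    ∀ (l : List (List Int)) (i0 : Nat), l = m.drop i0 → i0 + l.length = m.length →
      contribB m.length d l i0
        = (List.range (l.length - d)).map (fun t => elemA m (i0 + t) (i0 + t + d)) := by
  intro l
  induction l with
  | nil => intro i0 _ _; simp [contribB]
  | cons row rest ih =>
    intro i0 hdrop hlen
    have h0 : m[i0]? = some row := by
      have h : (List.drop i0 m)[0]? = some row := by rw [← hdrop]; rfl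
      simpa using h
    have hrest : rest = m.drop (i0 + 1) := by
      have h1 : (m.drop i0).tail = m.drop (i0 + 1) := List.tail_drop ..
      rw [← hdrop] at h1
      simpa using h1
    have hl : rest.length + 1 + i0 = m.length := by
      simp at hlen; omega
    rw [contribB]
    by_cases hc : i0 + d < m.length
    · have hcount : (row :: rest).length - d = (rest.length - d) + 1 := by
        simp only [List.length_cons]; omega
      rw [if_pos ⟨hd, hc⟩, ih (i0 + 1) hrest (by omega), hcount,
        List.range_succ_eq_map, List.map_cons, List.map_map]
      have hfe : ((fun t => elemA m (i0 + t) (i0 + t + d)) ∘ Nat.succ)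
          = fun t => elemA m (i0 + 1 + t) (i0 + 1 + t + d) := by
        funext t
        have h1 : i0 + (t + 1) = i0 + 1 + t := by omega
        simp [Function.comp, Nat.succ_eq_add_one, h1]
      rw [hfe]
      simp [elemA, List.getD, h0]
    · have hz : (row :: rest).length - d = 0 := by
        simp only [List.length_cons]; omega
      have hz' : rest.length - d = 0 := by omega
      rw [if_neg (fun h => hc h.2), ih (i0 + 1) hrest (by omega), hz, hz']
      simp

-- closed form for port A
theorem portA_closed (m : List (List Int)) :
    verifica_diagonal_acima_valor_zero m
      = (((List.range (m.length - 1)).map (fun t =>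
            (List.range (m.length - (1 + t))).map (fun s => elemA m (0 + s) ((1 + t) + s)))).filter
          (fun b => decide ((0 : Int) ∈ b))) := by
  unfold verifica_diagonal_acima_valor_zero
  rw [outerA_eq m (m.length - 1) 1 [] rfl]
  rw [PySem.List.foldl_append_ite_eq_filter]
  simp only [List.nil_append]
  congr 1
  apply List.map_congr_left
  intro t _
  rw [innerA_eq m (m.length - (1 + t)) 0 (1 + t) [] rfl]
  simp

-- closed form for port B
theorem portB_closed (m : List (List Int)) :
    verifica_diagonal_acima_valor_zero_alt m
      = (((List.range (m.length - 1)).map (fun t =>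
            (List.range (m.length - (1 + t))).map (fun s => elemA m (0 + s) ((1 + t) + s)))).filter
          (fun b => decide ((0 : Int) ∈ b))) := by
  unfold verifica_diagonal_acima_valor_zero_alt
  rw [fillInv m.length m 0 (List.replicate m.length []) (by simp)]
  rw [← List.map_drop, List.range_eq_range', List.drop_range']
  have hr : List.range' (0 + 1) (m.length - 1) = (List.range (m.length - 1)).map (fun t => 1 + t) := by
    rw [List.range'_eq_map_range]
  rw [hr, List.map_map]
  congr 1
  apply List.map_congr_left
  intro t ht
  have htl : t < m.length - 1 := by simpa using ht
  have hget : (List.replicate m.length ([] : List Int)).getD (1 + t) [] = [] := by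
    rw [List.getD_eq_getElem _ _ (by simp; omega)]
    simp
  simp only [Function.comp]
  rw [hget, List.nil_append,
    contribB_eq m (1 + t) (by omega) m 0 (by simp) (by simp)]
  apply List.map_congr_left
  intro s _
  have h1 : 0 + s + (1 + t) = 1 + t + s := by omega
  rw [h1]

-- ===== VERDICT (by name: the statement is the Claim_ definition above) =====
theorem verifica_diagonal_acima_valor_zero_spec : Claim_equal_verifica_diagonal_acima_valor_zero := by
  intro m _ _
  unfold Spec_verifica_diagonal_acima_valor_zero
  rw [portA_closed, portB_closed]
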